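-- pv_equiv track=rewrite | github.com/pschale/pyCondorSTAMP | create_config_file/generateInputFileLib.py | cutBadTimes
-- ===== SOURCE A (Python) =====
-- def cutBadTimes(interval, bad_times):
--     tempBadTimes = [x for x in bad_times if interval[0] <= x < interval[1]]
--     if len(tempBadTimes) > 0:
--         timeList = []
--         if tempBadTimes[0] > interval[0]:
--             timeList += [[interval[0], tempBadTimes[0]]]
--         if len(tempBadTimes) > 1:
--             timeList += [[tempBadTimes[num] + 1, tempBadTimes[num+1]] for num in range(len(tempBadTimes)-1)]
--         if tempBadTimes[-1] + 1 < interval[1]: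
--             timeList += [[tempBadTimes[-1] + 1, interval[1]]]
--     else:
--         timeList = [interval]
--     return timeList
-- ===== SOURCE B (Python) =====
-- def cutBadTimes(interval, bad_times):
--     lo, hi = interval[0], interval[1]
--     out = []
--     start = lo
--     first = True
--     for t in bad_times:
--         if lo <= t < hi:
--             if first:
--                 if t > lo:
--                     out.append([lo, t])
--                 first = False
--             else:
--                 out.append([start, t])
--             start = t + 1
--     if first:
--         return [interval]
--     if start < hi:
--         out.append([start, hi])
--     return out
-- ===== Notes on version B (the rewrite author's own statement) =====
-- stated objective: simpler
-- what changed: B replaces A's filter pass plus three separate list-building passes (guarded head segment, indexed range-comprehension over consecutive pairs, guarded tail segment) by one single pass over bad_times with a running segment-start accumulator. Pre_ excludes intervals with fewer than two endpoints, where A's lazily-evaluated filter can still return [interval] but B's upfront unpacking of interval[0], interval[1] raises IndexError.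
-- outside the precondition, e.g. on cutBadTimes([], []): A returns [[]], B raises IndexError; on cutBadTimes([5], [3]): A returns [[5]], B raises IndexError
import Mathlib
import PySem

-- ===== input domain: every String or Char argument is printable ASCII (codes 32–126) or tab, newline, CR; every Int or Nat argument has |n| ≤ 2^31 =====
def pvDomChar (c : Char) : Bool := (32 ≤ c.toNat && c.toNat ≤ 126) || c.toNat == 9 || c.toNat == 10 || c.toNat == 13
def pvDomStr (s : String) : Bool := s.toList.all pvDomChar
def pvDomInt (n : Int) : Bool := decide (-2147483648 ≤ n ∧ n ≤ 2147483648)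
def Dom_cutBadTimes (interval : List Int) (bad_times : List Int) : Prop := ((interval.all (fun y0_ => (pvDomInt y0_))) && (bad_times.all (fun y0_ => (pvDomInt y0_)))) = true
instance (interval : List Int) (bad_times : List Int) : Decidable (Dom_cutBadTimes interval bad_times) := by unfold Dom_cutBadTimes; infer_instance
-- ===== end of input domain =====

-- B replaces A's filter + three list-building passes by one pass over bad_times with a running
-- segment-start accumulator; same cost, shorter and plainer.


-- ===== PORT A =====
def cutBadTimes (interval : List Int) (bad_times : List Int) : List (List Int) :=
  match interval with
  | lo :: hi :: _ =>
    let temp := bad_times.filter (fun x => decide (lo ≤ x ∧ x < hi))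
    match temp with
    | [] => [interval]                                   -- timeList = [interval]
    | t0 :: rest =>
      -- if tempBadTimes[0] > interval[0]: timeList += [[interval[0], tempBadTimes[0]]]
      let tl1 : List (List Int) := if t0 > lo then [[lo, t0]] else []
      -- [[tempBadTimes[num]+1, tempBadTimes[num+1]] for num in range(len(tempBadTimes)-1)]
      let tl2 : List (List Int) :=
        (List.range ((t0 :: rest).length - 1)).map
          (fun num => [(t0 :: rest).getD num 0 + 1, (t0 :: rest).getD (num + 1) 0])
      -- tempBadTimes[-1] (list is nonempty here)
      let last := (t0 :: rest).getLastD 0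
      let tl3 : List (List Int) := if last + 1 < hi then [[last + 1, hi]] else []
      tl1 ++ tl2 ++ tl3
  | _ => []  -- Python raises IndexError here: excluded by Pre_

-- ===== PORT B =====
-- the body of B's for-loop, over state (out, start, first)
def stepB (lo hi : Int) (st : List (List Int) × Int × Bool) (t : Int) :
    List (List Int) × Int × Bool :=
  if decide (lo ≤ t ∧ t < hi) then
    if st.2.2 then
      ((if t > lo then st.1 ++ [[lo, t]] else st.1), t + 1, false)
    else
      (st.1 ++ [[st.2.1, t]], t + 1, false)
  else st

def cutBadTimes_alt (interval : List Int) (bad_times : List Int) : List (List Int) :=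
  match interval.head?, interval.tail.head? with
  | some lo, some hi =>
    let s := bad_times.foldl (stepB lo hi) ([], lo, true)
    if s.2.2 then [interval]
    else if s.2.1 < hi then s.1 ++ [[s.2.1, hi]] else s.1
  | _, _ => []  -- Python raises IndexError here: excluded by Pre_

-- ===== PRECONDITION & SPEC =====
-- Pre_ excludes intervals with fewer than two endpoints: there B raises IndexError unpacking
-- interval[0], interval[1], while A's lazily-evaluated filter can still return [interval]
-- when no bad time reaches the interval[1] comparison.
def Pre_cutBadTimes (interval : List Int) (bad_times : List Int) : Prop := 2 ≤ interval.length
instance (interval : List Int) (bad_times : List Int) : Decidable (Pre_cutBadTimes interval bad_times) := by unfold Pre_cutBadTimes; infer_instance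
def pvWitness_cutBadTimes : List Int × List Int := ([0, 10], [2, 3, 7])

def Spec_cutBadTimes (interval : List Int) (bad_times : List Int) (out : List (List Int)) : Prop := out = cutBadTimes_alt interval bad_times
instance (interval : List Int) (bad_times : List Int) (out : List (List Int)) : Decidable (Spec_cutBadTimes interval bad_times out) := by unfold Spec_cutBadTimes; infer_instance

-- ===== CLAIM (what is proved, stated in full; the proofs are below) =====
def Claim_equal_cutBadTimes : Prop := ∀ (interval : List Int) (bad_times : List Int), Dom_cutBadTimes interval bad_times → Pre_cutBadTimes interval bad_times → Spec_cutBadTimes interval bad_times (cutBadTimes interval bad_times)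

-- ===== LEMMAS AND PROOFS =====

-- segs start ts: the segments [start, t₀], [t₀+1, t₁], … generated by a running start.
def segs : Int → List Int → List (List Int)
  | _, [] => []
  | start, t :: ts => [start, t] :: segs (t + 1) ts

-- fin start ts: the value of the running start after consuming ts.
def fin : Int → List Int → Int
  | start, [] => start
  | _, t :: ts => fin (t + 1) ts

-- A's range-indexed middle comprehension equals segs over the tail.
theorem segA (rest : List Int) : ∀ t0 : Int,
    (List.range ((t0 :: rest).length - 1)).map
      (fun num => [(t0 :: rest).getD num 0 + 1, (t0 :: rest).getD (num + 1) 0])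
      = segs (t0 + 1) rest := by
  induction rest with
  | nil => intro t0; simp [segs]
  | cons t1 ts ih =>
    intro t0
    have := ih t1
    simp only [List.length_cons, Nat.add_sub_cancel] at this ⊢
    rw [List.range_succ_eq_map]
    simp only [List.map_cons, List.map_map]
    simp only [List.getD_cons_zero, List.getD_cons_succ, segs]
    refine congrArg _ ?_
    rw [← this]
    rfl

-- fin over the tail of a nonempty list is its last element + 1.
theorem fin_last (ts : List Int) : ∀ (t d : Int),
    fin (t + 1) ts = (t :: ts).getLast?.getD d + 1 := by
  induction ts with
  | nil => intro t d; simp [fin]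
  | cons t1 ts ih => intro t d; simpa [fin, List.getLast?_cons_cons] using ih t1 d

-- Invariant of B's loop once the first in-range time has been seen.
theorem foldB_false (lo hi : Int) (l : List Int) : ∀ (out : List (List Int)) (start : Int),
    l.foldl (stepB lo hi) (out, start, false)
      = (out ++ segs start (l.filter (fun x => decide (lo ≤ x ∧ x < hi))),
         fin start (l.filter (fun x => decide (lo ≤ x ∧ x < hi))), false) := by
  induction l with
  | nil => intro out start; simp [segs, fin]
  | cons t ts ih =>
    intro out start
    by_cases h : lo ≤ t ∧ t < hi
    · simp [stepB, h, ih, segs, fin]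
    · simp [stepB, h, ih]

-- B's full loop, characterised by the filtered bad times.
theorem foldB_true (lo hi : Int) (l : List Int) :
    l.foldl (stepB lo hi) ([], lo, true)
      = match l.filter (fun x => decide (lo ≤ x ∧ x < hi)) with
        | [] => ([], lo, true)
        | t0 :: rest => ((if t0 > lo then [[lo, t0]] else []) ++ segs (t0 + 1) rest,
                         fin (t0 + 1) rest, false) := by
  induction l with
  | nil => simp
  | cons t ts ih =>
    by_cases h : lo ≤ t ∧ t < hi
    · simp only [List.filter_cons, h, decide_true, List.foldl_cons]
      have : stepB lo hi ([], lo, true) t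
          = ((if t > lo then [[lo, t]] else []), t + 1, false) := by
        simp [stepB, h]
      rw [this, foldB_false]
      simp
    · simp only [List.filter_cons, h, decide_false, List.foldl_cons]
      have hs : stepB lo hi ([], lo, true) t = ([], lo, true) := by simp [stepB, h]
      rw [hs, ih]
      simp

-- ===== VERDICT (by name: the statement is the Claim_ definition above) =====
theorem cutBadTimes_spec : Claim_equal_cutBadTimes := by
  intro interval bad_times _ hpre
  unfold Spec_cutBadTimes
  match interval with
  | [] => simp [Pre_cutBadTimes] at hpre
  | [_] => simp [Pre_cutBadTimes] at hpre
  | lo :: hi :: tl =>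
    show cutBadTimes (lo :: hi :: tl) bad_times = cutBadTimes_alt (lo :: hi :: tl) bad_times
    simp only [cutBadTimes, cutBadTimes_alt, List.head?_cons, List.tail_cons, foldB_true]
    cases hf : bad_times.filter (fun x => decide (lo ≤ x ∧ x < hi)) with
    | nil => simp
    | cons t0 rest =>
      simp only [segA]
      rw [fin_last rest t0 0]
      by_cases hlast : (t0 :: rest).getLast?.getD 0 + 1 < hi <;> simp [hlast]
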